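-- pv_equiv track=rewrite | github.com/Seraphin-/ctf | 2025/irisctf/sphincs5/sphincs_util.py | base_w
-- ===== SOURCE A (Python) =====
-- SPX_WOTS_W = 16
--
-- SPX_WOTS_LOGW = 4
--
-- def base_w(out_len, input):
--     inp = 0
--     out = 0
--     total = 0
--     bits = 0
--     output = [0] * out_len
--     for consumed in range(out_len):
--         if bits == 0:
--             total = input[inp]
--             inp += 1
--             bits += 8
--         bits -= SPX_WOTS_LOGW
--         output[out] = (total >> bits) & (SPX_WOTS_W - 1)
--         out += 1
--     return output
-- ===== SOURCE B (Python) =====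
-- def base_w(out_len, input):
--     # Each input byte yields exactly two base-16 digits (logw=4 divides 8):
--     # read ceil(out_len/2) bytes, emit high then low nibble, truncate to out_len.
--     output = []
--     for i in range((out_len + 1) // 2):
--         b = input[i]
--         output.append((b >> 4) & 15)
--         output.append(b & 15)
--     return output[:out_len]
-- ===== Notes on version B (the rewrite author's own statement) =====
-- stated objective: simpler
-- what changed: Replaced the per-output bit-accumulator loop (inp/total/bits state, preallocated output array) with a loop over input bytes that emits the high and low nibble of each byte and truncates the list to out_len.
import Mathlib
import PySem

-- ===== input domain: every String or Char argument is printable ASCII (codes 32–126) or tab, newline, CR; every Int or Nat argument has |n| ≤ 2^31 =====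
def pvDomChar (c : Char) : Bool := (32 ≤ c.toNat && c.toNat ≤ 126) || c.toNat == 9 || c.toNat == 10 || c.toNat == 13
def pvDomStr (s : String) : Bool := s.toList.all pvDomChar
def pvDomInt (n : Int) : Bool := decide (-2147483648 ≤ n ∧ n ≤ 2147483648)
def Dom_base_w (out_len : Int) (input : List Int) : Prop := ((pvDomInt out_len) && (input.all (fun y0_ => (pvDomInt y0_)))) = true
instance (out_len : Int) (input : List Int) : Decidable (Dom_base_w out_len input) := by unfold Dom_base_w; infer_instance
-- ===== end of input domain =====

-- B replaces A's per-output bit-accumulator loop by a loop over the input bytes,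
-- emitting two nibbles per byte and truncating to out_len (objective: simpler).

-- ===== PORT A =====
-- loop state: (remaining iterations, inp, total, bits, output, out); input[inp] via pyGetD
-- (Pre_ guarantees the index is in range exactly where Python does not raise)
def baseWGo (input : List Int) : Nat → Nat → Int → Int → List Int → Nat → List Int
  | 0, _, _, _, output, _ => output
  | r+1, inp, total, bits, output, out =>
    let s := if bits = 0 then (PySem.List.pyGetD input (inp : Int) 0, inp + 1, bits + 8)
             else (total, inp, bits)
    let bits' := s.2.2 - 4
    baseWGo input r s.2.1 s.1 bits'
      (output.set out (PySem.Int.band (s.1 >>> bits'.toNat) 15)) (out + 1)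

def base_w (out_len : Int) (input : List Int) : List Int :=
  baseWGo input out_len.toNat 0 0 0 (List.replicate out_len.toNat 0) 0

-- ===== PORT B =====
def base_w_alt (out_len : Int) (input : List Int) : List Int :=
  let output :=
    (PySem.List.pyRange 0 (PySem.Int.floordiv (out_len + 1) 2) 1).foldl
      (fun acc i =>
        let b := PySem.List.pyGetD input i 0
        acc ++ [PySem.Int.band (b >>> (4:Nat)) 15, PySem.Int.band b 15]) []
  PySem.List.slice output none (some out_len)

-- ===== PRECONDITION & SPEC =====
-- Pre_ excludes exactly the inputs where the Python A raises IndexError: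
-- A reads ceil(out_len/2) bytes, so it returns iff out_len ≤ 2 * len(input).
def Pre_base_w (out_len : Int) (input : List Int) : Prop :=
  out_len ≤ 2 * (input.length : Int)
instance (out_len : Int) (input : List Int) : Decidable (Pre_base_w out_len input) := by
  unfold Pre_base_w; infer_instance

def pvWitness_base_w : Int × List Int := (3, [171, 205])

def Spec_base_w (out_len : Int) (input : List Int) (out : List Int) : Prop := out = base_w_alt out_len input
instance (out_len : Int) (input : List Int) (out : List Int) : Decidable (Spec_base_w out_len input out) := by unfold Spec_base_w; infer_instance

-- ===== CLAIM (what is proved, stated in full; the proofs are below) =====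
def Claim_equal_base_w : Prop := ∀ (out_len : Int) (input : List Int), Dom_base_w out_len input → Pre_base_w out_len input → Spec_base_w out_len input (base_w out_len input)

-- ===== LEMMAS AND PROOFS =====

def nibHi (input : List Int) (i : Int) : Int :=
  PySem.Int.band (PySem.List.pyGetD input i 0 >>> (4:Nat)) 15
def nibLo (input : List Int) (i : Int) : Int :=
  PySem.Int.band (PySem.List.pyGetD input i 0) 15

-- reference: the r nibbles starting at byte position inp
def nib (input : List Int) : Nat → Nat → List Int
  | 0, _ => []
  | 1, inp => [nibHi input (inp : Int)]
  | r+2, inp => nibHi input (inp : Int) :: nibLo input (inp : Int) :: nib input r (inp + 1)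

lemma stepA (input : List Int) (r : Nat) (inp : Nat) (t : Int) (output : List Int) (out : Nat) :
    baseWGo input (r+1) inp t 0 output out
    = baseWGo input r (inp+1) (PySem.List.pyGetD input (inp : Int) 0) 4
        (output.set out (nibHi input (inp : Int))) (out+1) := by
  show baseWGo input r _ _ _ _ _ = _
  unfold nibHi
  norm_num
  rfl

lemma stepB (input : List Int) (r : Nat) (inp : Nat) (t : Int) (output : List Int) (out : Nat) :
    baseWGo input (r+1) inp t 4 output out
    = baseWGo input r inp t 0 (output.set out (PySem.Int.band t 15)) (out+1) := by
  show baseWGo input r _ _ _ _ _ = _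
  norm_num

lemma set_append_replicate (acc : List Int) (r : Nat) (x : Int) :
    (acc ++ List.replicate (r+1) 0).set acc.length x = acc ++ x :: List.replicate r 0 := by
  simp [List.replicate_succ]

-- A's loop, entered with bits = 0, writes exactly the nibble stream
lemma baseWGo_eq_nib (input : List Int) (r : Nat) :
    ∀ inp t acc, baseWGo input r inp t 0 (acc ++ List.replicate r 0) acc.length
      = acc ++ nib input r inp := by
  induction r using Nat.strong_induction_on with
  | _ r ih =>
    intro inp t acc
    match r with
    | 0 => simp [baseWGo, nib]
    | 1 =>
      rw [stepA, set_append_replicate]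
      simp [baseWGo, nib]
    | s+2 =>
      rw [stepA, set_append_replicate,
          show acc ++ nibHi input (inp : Int) :: List.replicate (s+1) 0
             = (acc ++ [nibHi input (inp : Int)]) ++ List.replicate (s+1) 0 by simp,
          show acc.length + 1 = (acc ++ [nibHi input (inp : Int)]).length by simp,
          stepB, set_append_replicate,
          show PySem.Int.band (PySem.List.pyGetD input (inp : Int) 0) 15 = nibLo input (inp : Int) from rfl,
          show (acc ++ [nibHi input (inp : Int)]) ++ nibLo input (inp : Int) :: List.replicate s 0
             = (acc ++ [nibHi input (inp : Int), nibLo input (inp : Int)]) ++ List.replicate s 0 by simp,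
          show (acc ++ [nibHi input (inp : Int)]).length + 1
             = (acc ++ [nibHi input (inp : Int), nibLo input (inp : Int)]).length by simp,
          ih s (by omega) (inp+1) (PySem.List.pyGetD input (inp : Int) 0)]
      simp [nib]

lemma base_w_eq_nib (out_len : Int) (input : List Int) :
    base_w out_len input = nib input out_len.toNat 0 := by
  have h := baseWGo_eq_nib input out_len.toNat 0 0 []
  simpa [base_w] using h

-- B side: the fold over byte indices is the flat nibble stream
def flatNib (input : List Int) (inp c : Nat) : List Int :=
  (List.range c).flatMap (fun k => [nibHi input ((inp + k : Nat) : Int), nibLo input ((inp + k : Nat) : Int)])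

lemma flatNib_succ (input : List Int) (inp c : Nat) :
    flatNib input inp (c+1)
      = nibHi input (inp : Int) :: nibLo input (inp : Int) :: flatNib input (inp+1) c := by
  simp only [flatNib, List.range_succ_eq_map, List.flatMap_cons, List.flatMap_map]
  simp only [Nat.add_zero, List.cons_append, List.nil_append]
  congr 1
  congr 1
  congr 1
  funext k
  rw [show inp + k.succ = inp + 1 + k by omega]

lemma take_flatNib (input : List Int) :
    ∀ c inp r, r ≤ 2*c → 2*c ≤ r+1 → (flatNib input inp c).take r = nib input r inp := by
  intro c
  induction c with
  | zero =>
    intro inp r h1 h2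
    have : r = 0 := by omega
    subst this
    simp [flatNib, nib]
  | succ c ih =>
    intro inp r h1 h2
    rw [flatNib_succ]
    match r, h1, h2 with
    | 1, h1, h2 =>
      have : c = 0 := by omega
      subst this
      simp [nib]
    | s+2, h1, h2 =>
      simp only [List.take_succ_cons]
      rw [ih (inp+1) s (by omega) (by omega)]
      simp [nib]

lemma base_w_alt_eq_nib (out_len : Int) (input : List Int) :
    base_w_alt out_len input = nib input out_len.toNat 0 := by
  by_cases h : 0 ≤ out_len
  · -- out_len = ↑n
    obtain ⟨n, rfl⟩ : ∃ n : Nat, out_len = (n : Int) := ⟨out_len.toNat, (Int.toNat_of_nonneg h).symm⟩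
    have hm : PySem.Int.floordiv ((n : Int) + 1) 2 = (((n+1)/2 : Nat) : Int) := by
      rw [show ((n : Int) + 1) = ((n+1 : Nat) : Int) by push_cast; ring]
      exact_mod_cast PySem.Int.floordiv_natCast (n+1) 2
    simp only [base_w_alt, hm, PySem.List.pyRange_zero_nat]
    rw [List.foldl_map, PySem.List.foldl_append_eq_flatMap
        (fun k : Nat => [PySem.Int.band (PySem.List.pyGetD input (k : Int) 0 >>> (4:Nat)) 15,
                         PySem.Int.band (PySem.List.pyGetD input (k : Int) 0) 15])]
    rw [List.nil_append, PySem.List.slice_to_natCast]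
    have hflat : (List.range ((n+1)/2)).flatMap
        (fun k : Nat => [PySem.Int.band (PySem.List.pyGetD input (k : Int) 0 >>> (4:Nat)) 15,
                         PySem.Int.band (PySem.List.pyGetD input (k : Int) 0) 15])
        = flatNib input 0 ((n+1)/2) := by
      simp [flatNib, nibHi, nibLo]
    rw [hflat, take_flatNib input ((n+1)/2) 0 n (by omega) (by omega), Int.toNat_natCast]
  · -- negative out_len: both sides are []
    push Not at h
    have hm : PySem.Int.floordiv (out_len + 1) 2 ≤ 0 := by
      have h2 : PySem.Int.floordiv (out_len + 1) 2 < 1 := by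
        rw [PySem.Int.floordiv_lt_iff_lt_mul (by omega)]
        omega
      omega
    have hn : out_len.toNat = 0 := by omega
    rw [hn]
    simp only [base_w_alt, PySem.List.pyRange_one_eq_nil hm, List.foldl_nil, nib]
    simp [PySem.List.slice]

-- ===== VERDICT (by name: the statement is the Claim_ definition above) =====
theorem base_w_spec : Claim_equal_base_w := by
  intro out_len input _ _
  unfold Spec_base_w
  rw [base_w_eq_nib, base_w_alt_eq_nib]
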